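-- pv_equiv track=rewrite | github.com/Xus4/docling-demo | src/llm_markdown_refiner.py | _extract_first_table_block
-- ===== SOURCE A (Python) =====
-- def _extract_first_table_block(output_text: str) -> str:
--     """
--     从模型输出里尽量提取一个表格块（连续以 '|' 开头的行）。
--     """
--     if not output_text:
--         return ""
--     lines = output_text.splitlines()
--     in_table = False
--     buf: list[str] = []
--     for l in lines:
--         t = l.strip()
--         if t.startswith("|") and t.count("|") >= 2:
--             if not in_table:
--                 in_table = True
--                 buf = []
--             buf.append(l)
--         else:
--             if in_table and buf:
--                 break
--     return "\n".join(buf).strip()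
-- ===== SOURCE B (Python) =====
-- def _extract_first_table_block(output_text: str) -> str:
--     def is_row(l: str) -> bool:
--         t = l.strip()
--         return t.startswith("|") and t.count("|") >= 2
--     lines = output_text.splitlines()
--     i = 0
--     while i < len(lines) and not is_row(lines[i]):
--         i += 1
--     j = i
--     while j < len(lines) and is_row(lines[j]):
--         j += 1
--     return "\n".join(lines[i:j]).strip()
-- ===== Notes on version B (the rewrite author's own statement) =====
-- stated objective: simpler
-- what changed: Replaces the in_table flag / buffer / break state machine with a two-phase scan: skip lines until the first table row, then take the contiguous run of table rows, slicing and joining once.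
import Mathlib
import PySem

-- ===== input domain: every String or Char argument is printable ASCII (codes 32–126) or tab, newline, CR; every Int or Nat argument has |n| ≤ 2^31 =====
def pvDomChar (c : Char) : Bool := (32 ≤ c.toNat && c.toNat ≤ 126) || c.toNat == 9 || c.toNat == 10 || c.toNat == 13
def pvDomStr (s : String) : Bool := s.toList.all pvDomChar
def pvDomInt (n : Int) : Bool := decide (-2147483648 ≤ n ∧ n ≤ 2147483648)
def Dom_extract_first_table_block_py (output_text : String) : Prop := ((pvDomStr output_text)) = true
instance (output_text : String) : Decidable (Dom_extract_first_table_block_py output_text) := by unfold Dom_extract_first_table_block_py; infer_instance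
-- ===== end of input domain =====

-- B replaces A's in_table-flag/buffer/break state machine with a skip-then-take two-phase scan (objective: simpler).

-- ===== PORT A =====
-- A's loop: state (in_table, buf); a table row starts (or extends) the buffer, a
-- non-table row after a non-empty buffer breaks out of the loop returning buf.
def pvLoopA : List String → Bool → List String → List String
  | [], _, buf => buf
  | l :: ls, inTable, buf =>
    let t := PySem.Str.strip l
    if PySem.Str.startswith t "|" && decide (2 ≤ PySem.Str.count t "|") then
      pvLoopA ls true ((if inTable then buf else []) ++ [l])
    else if inTable && !buf.isEmpty then buf
    else pvLoopA ls inTable buf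

def extract_first_table_block_py (output_text : String) : String :=
  if output_text == "" then ""
  else
    PySem.Str.strip (PySem.Str.join "\n" (pvLoopA (PySem.Str.splitlines output_text) false []))

-- ===== PORT B =====
def pvIsRow (l : String) : Bool :=
  let t := PySem.Str.strip l
  PySem.Str.startswith t "|" && decide (2 ≤ PySem.Str.count t "|")

-- B's first while loop: advance past non-table rows (lines[i:])
def pvSkip : List String → List String
  | [] => []
  | l :: ls => if pvIsRow l then l :: ls else pvSkip ls

-- B's second while loop: lines[i:j], the leading run of table rows
def pvTake : List String → List String
  | [] => []
  | l :: ls => if pvIsRow l then l :: pvTake ls else []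

def extract_first_table_block_py_alt (output_text : String) : String :=
  PySem.Str.strip (PySem.Str.join "\n" (pvTake (pvSkip (PySem.Str.splitlines output_text))))

-- ===== PRECONDITION & SPEC =====
def Spec_extract_first_table_block_py (output_text : String) (out : String) : Prop := out = extract_first_table_block_py_alt output_text
instance (output_text : String) (out : String) : Decidable (Spec_extract_first_table_block_py output_text out) := by unfold Spec_extract_first_table_block_py; infer_instance

-- ===== CLAIM (what is proved, stated in full; the proofs are below) =====
def Claim_equal_extract_first_table_block_py : Prop := ∀ (output_text : String), Dom_extract_first_table_block_py output_text → Spec_extract_first_table_block_py output_text (extract_first_table_block_py output_text)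

-- ===== LEMMAS AND PROOFS =====

-- once in the table with a non-empty buffer, A appends the leading run of rows and stops
lemma pvLoopA_true (ls : List String) : ∀ buf : List String, buf ≠ [] →
    pvLoopA ls true buf = buf ++ pvTake ls := by
  induction ls with
  | nil => intro buf _; simp [pvLoopA, pvTake]
  | cons l ls ih =>
    intro buf hbuf
    by_cases h : pvIsRow l
    · have hc : (PySem.Str.startswith (PySem.Str.strip l) "|"
          && decide (2 ≤ PySem.Str.count (PySem.Str.strip l) "|")) = true := h
      simp only [pvLoopA, pvTake, hc, if_true, h]
      rw [ih (buf ++ [l]) (by simp)]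
      simp
    · have hc : (PySem.Str.startswith (PySem.Str.strip l) "|"
          && decide (2 ≤ PySem.Str.count (PySem.Str.strip l) "|")) = false := by
        simpa [pvIsRow] using h
      simp only [pvLoopA, pvTake, hc, h]
      simp [hbuf]

-- before any table row, A's loop is B's skip followed by B's take
lemma pvLoopA_eq (ls : List String) : pvLoopA ls false [] = pvTake (pvSkip ls) := by
  induction ls with
  | nil => simp [pvLoopA, pvSkip, pvTake]
  | cons l ls ih =>
    by_cases h : pvIsRow l
    · have hc : (PySem.Str.startswith (PySem.Str.strip l) "|"
          && decide (2 ≤ PySem.Str.count (PySem.Str.strip l) "|")) = true := h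
      simp only [pvLoopA, pvSkip, pvTake, hc, if_true, h, Bool.false_eq_true,
        if_false, List.nil_append]
      rw [pvLoopA_true ls [l] (by simp)]
      simp
    · have hc : (PySem.Str.startswith (PySem.Str.strip l) "|"
          && decide (2 ≤ PySem.Str.count (PySem.Str.strip l) "|")) = false := by
        simpa [pvIsRow] using h
      simp only [pvLoopA, pvSkip, hc, h]
      simpa using ih

-- ===== VERDICT (by name: the statement is the Claim_ definition above) =====
theorem extract_first_table_block_py_spec : Claim_equal_extract_first_table_block_py := by
  intro output_text _
  unfold Spec_extract_first_table_block_py extract_first_table_block_py extract_first_table_block_py_alt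
  by_cases h : output_text == ""
  · have : output_text = "" := by simpa using h
    subst this
    decide
  · simp only [h, pvLoopA_eq]
    rfl
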